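-- pv_equiv track=rewrite | github.com/arcarum/Keystroke-Dynamics-for-2FA | demo.py | calculate_features
-- ===== SOURCE A (Python) =====
-- def calculate_features(log):
--     features = []
--     prev_character = None
--     for i, entry in enumerate(log):
--         new = {}
--         character = entry[0]
--         dwell_time = entry[2] - entry[1]
--
--         if prev_character:
--             key = f"{prev_character}-{character}"
--             new[key] = flight
--
--         flight = 0 if i == len(log) - 1 else log[i+1][1] - entry[2]
--
--         new[character] = dwell_time
--         prev_character = character
--         features.append(new)
--
--     return features
-- ===== SOURCE B (Python) =====
-- def calculate_features(log):
--     # Three-comprehension decomposition: flight dicts from consecutive pairs, dwell dicts, then merge.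
--     flights = [{}] + [({f"{p[0]}-{c[0]}": c[1] - p[2]} if p[0] else {})
--                       for p, c in zip(log, log[1:])]
--     dwells = [{ch: release - press} for ch, press, release in log]
--     return [{**f, **d} for f, d in zip(flights, dwells)]
-- ===== Notes on version B (the rewrite author's own statement) =====
-- stated objective: alternative
-- what changed: Replaces A's single stateful loop (carrying prev_character and a flight value computed one iteration ahead) with a stateless decomposition: dwell dicts from each entry, flight dicts from zip(log, log[1:]), merged pairwise.
import Mathlib
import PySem

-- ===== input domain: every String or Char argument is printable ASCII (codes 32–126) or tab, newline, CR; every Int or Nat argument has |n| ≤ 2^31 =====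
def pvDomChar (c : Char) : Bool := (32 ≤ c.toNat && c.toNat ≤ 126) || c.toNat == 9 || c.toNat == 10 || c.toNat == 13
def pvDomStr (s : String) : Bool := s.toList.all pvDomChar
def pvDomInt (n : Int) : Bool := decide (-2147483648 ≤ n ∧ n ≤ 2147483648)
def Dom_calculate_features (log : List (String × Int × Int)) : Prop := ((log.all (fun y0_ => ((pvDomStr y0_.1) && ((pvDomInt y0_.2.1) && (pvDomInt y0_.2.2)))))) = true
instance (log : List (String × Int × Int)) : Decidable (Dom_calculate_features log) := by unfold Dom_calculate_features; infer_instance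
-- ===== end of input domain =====

-- B merges per-entry dwell dicts with flight dicts built from consecutive pairs (zip-based
-- decomposition, no carried loop state); same return value as A everywhere (alternative, not faster).

-- ===== PORT A =====
-- Python dict assignment d[k] = v: overwrite in place if the key exists, else append.
def pvDictInsert (d : List (String × Int)) (k : String) (v : Int) : List (String × Int) :=
  match d with
  | [] => [(k, v)]
  | (k', v') :: rest => if k' == k then (k', v) :: rest else (k', v') :: pvDictInsert rest k v

-- the for-loop of A, carrying (prev_character, flight, features); `flight` is only read
-- after it has been assigned (guarded by `if prev_character:`), so its initial value 0 is never used.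
def pvALoop (log : List (String × Int × Int)) (items : List (Int × (String × Int × Int)))
    (prev_character : Option String) (flight : Int)
    (features : List (List (String × Int))) : List (List (String × Int)) :=
  match items with
  | [] => features
  | (i, entry) :: rest =>
    let character := entry.1
    let dwell_time := entry.2.2 - entry.2.1
    let new1 : List (String × Int) :=
      match prev_character with
      | some p => if p ≠ "" then pvDictInsert [] (p ++ "-" ++ character) flight else []
      | none => []
    -- log[i+1] is only read when i ≠ len(log) - 1, so the index is in range and getD never fires.
    let flight' : Int := if i = (log.length : Int) - 1 then 0
      else ((PySem.List.pyGet? log (i + 1)).getD entry).2.1 - entry.2.2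
    let new2 := pvDictInsert new1 character dwell_time
    pvALoop log rest (some character) flight' (features ++ [new2])

def calculate_features (log : List (String × Int × Int)) : List (List (String × Int)) :=
  pvALoop log (PySem.List.enumerate log) none 0 []

-- ===== PORT B =====
def pvFlightDict (pc : (String × Int × Int) × (String × Int × Int)) : List (String × Int) :=
  if pc.1.1 ≠ "" then [(pc.1.1 ++ "-" ++ pc.2.1, pc.2.2.1 - pc.1.2.2)] else []

def calculate_features_alt (log : List (String × Int × Int)) : List (List (String × Int)) :=
  let flights := ([] : List (String × Int)) :: (log.zip (log.drop 1)).map pvFlightDict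
  let dwells := log.map (fun e => [(e.1, e.2.2 - e.2.1)])
  -- {**f, **d}: the flight key (if any) is strictly longer than the dwell key, so plain append.
  List.zipWith (fun f d => f ++ d) flights dwells

-- ===== PRECONDITION & SPEC =====
def Spec_calculate_features (log : List (String × Int × Int)) (out : List (List (String × Int))) : Prop := out = calculate_features_alt log
instance (log : List (String × Int × Int)) (out : List (List (String × Int))) : Decidable (Spec_calculate_features log out) := by unfold Spec_calculate_features; infer_instance

-- ===== CLAIM (what is proved, stated in full; the proofs are below) =====
def Claim_equal_calculate_features : Prop := ∀ (log : List (String × Int × Int)), Dom_calculate_features log → Spec_calculate_features log (calculate_features log)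

-- ===== LEMMAS AND PROOFS =====

-- common specification: one output dict per entry, flight part determined by the previous entry
def pvGo (prev : Option (String × Int × Int)) (l : List (String × Int × Int)) :
    List (List (String × Int)) :=
  match l with
  | [] => []
  | e :: rest =>
    ((match prev with
      | some p => if p.1 ≠ "" then [(p.1 ++ "-" ++ e.1, e.2.1 - p.2.2)] else []
      | none => []) ++ [(e.1, e.2.2 - e.2.1)]) :: pvGo (some e) rest

theorem pvKeyNe (p c : String) : ((p ++ "-" ++ c) == c) = false := by
  rw [beq_eq_false_iff_ne]
  intro h
  have := congrArg String.length h
  simp [String.length_append] at this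

theorem pvB_go : ∀ (rest : List (String × Int × Int)) (p : String × Int × Int),
    List.zipWith (fun f d => f ++ d) ((List.zip (p :: rest) rest).map pvFlightDict)
      (rest.map (fun e => [(e.1, e.2.2 - e.2.1)])) = pvGo (some p) rest := by
  intro rest
  induction rest with
  | nil => intro p; rfl
  | cons e rest ih =>
    intro p
    simp only [List.zip_cons_cons, List.map_cons, List.zipWith_cons_cons, ih, pvGo, pvFlightDict]

theorem pvBalt_eq (log : List (String × Int × Int)) :
    calculate_features_alt log = pvGo none log := by
  cases log with
  | nil => rfl
  | cons e rest =>
    simp only [calculate_features_alt, List.drop_one, List.tail_cons, List.map_cons,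
      List.zipWith_cons_cons, pvGo, pvB_go, List.nil_append]

theorem pvALoop_eq : ∀ (rest pre : List (String × Int × Int)) (e : String × Int × Int)
    (prev : Option String) (flight : Int) (features : List (List (String × Int))),
    (match pre.getLast? with
     | some p => prev = some p.1 ∧ (p.1 ≠ "" → flight = e.2.1 - p.2.2)
     | none => prev = none) →
    pvALoop (pre ++ e :: rest) (PySem.List.enumerate (e :: rest) (pre.length : Int)) prev flight features
      = features ++ pvGo pre.getLast? (e :: rest) := by
  intro rest
  induction rest with
  | nil =>
    intro pre e prev flight features hpf
    simp only [PySem.List.enumerate_cons, PySem.List.enumerate_nil, pvALoop, pvGo]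
    cases hlast : pre.getLast? with
    | none =>
      rw [hlast] at hpf
      simp [hpf, pvDictInsert]
    | some p =>
      rw [hlast] at hpf
      obtain ⟨hprev, hfl⟩ := hpf
      subst hprev
      by_cases hp : p.1 = ""
      · simp [hp, pvDictInsert]
      · simp [hp, hfl hp, pvDictInsert, pvKeyNe]
  | cons e' rest ih =>
    intro pre e prev flight features hpf
    rw [PySem.List.enumerate_cons]
    simp only [pvALoop]
    have hne : ¬ ((pre.length : Int) = ((pre ++ e :: e' :: rest).length : Int) - 1) := by
      simp only [List.length_append, List.length_cons]
      push_cast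
      omega
    have hget : PySem.List.pyGet? (pre ++ e :: e' :: rest) ((pre.length : Int) + 1) = some e' := by
      have h1 : pre ++ e :: e' :: rest = (pre ++ [e]) ++ e' :: rest := by simp
      have h2 : ((pre.length : Int) + 1) = (((pre ++ [e]).length : Nat) : Int) := by
        simp [List.length_append]
      rw [h1, h2, PySem.List.pyGet?_append_length]
    rw [if_neg hne, hget, Option.getD_some]
    have hrw : pre ++ e :: e' :: rest = (pre ++ [e]) ++ e' :: rest := by simp
    have hstart : (pre.length : Int) + 1 = (((pre ++ [e]).length : Nat) : Int) := by
      simp [List.length_append]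
    rw [hrw, hstart, ih (pre ++ [e]) e' (some e.1) (e'.2.1 - e.2.2) _ (by simp)]
    rw [List.getLast?_concat, List.append_assoc]
    congr 1
    show _ :: pvGo (some e) (e' :: rest) = pvGo pre.getLast? (e :: e' :: rest)
    simp only [pvGo]
    congr 1
    cases hlast : pre.getLast? with
    | none =>
      rw [hlast] at hpf
      simp [hpf, pvDictInsert]
    | some p =>
      rw [hlast] at hpf
      obtain ⟨hprev, hfl⟩ := hpf
      subst hprev
      by_cases hp : p.1 = ""
      · simp [hp, pvDictInsert]
      · simp [hp, hfl hp, pvDictInsert, pvKeyNe]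

theorem calculate_features_spec : Claim_equal_calculate_features := by
  intro log _
  unfold Spec_calculate_features
  rw [pvBalt_eq]
  cases log with
  | nil => rfl
  | cons e rest =>
    have h := pvALoop_eq rest [] e none 0 [] (by simp)
    simpa using h
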